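-- pv_equiv track=rewrite | github.com/quark-zju/dotfiles | bin/scripts/prompt_log.py | highlight_fragments
-- ===== SOURCE A (Python) =====
-- def highlight_fragments(text, query, style_match="class:match", style_plain=""):
--     """Split text into (style, substring) fragments, highlighting query matches."""
--     if not query:
--         return [(style_plain, text)]
--     fragments = []
--     lower_text = text.lower()
--     lower_query = query.lower()
--     pos = 0
--     while pos < len(text):
--         idx = lower_text.find(lower_query, pos)
--         if idx == -1:
--             fragments.append((style_plain, text[pos:]))
--             break
--         if idx > pos:
--             fragments.append((style_plain, text[pos:idx]))
--         fragments.append((style_match, text[idx : idx + len(query)]))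
--         pos = idx + len(query)
--     return fragments
-- ===== SOURCE B (Python) =====
-- def highlight_fragments(text, query, style_match="class:match", style_plain=""):
--     """Split text into (style, substring) fragments, highlighting query matches."""
--     if not query:
--         return [(style_plain, text)]
--     lower_text = text.lower()
--     lower_query = query.lower()
--     # Pass 1: collect the start index of every (non-overlapping) match.
--     starts = []
--     pos = 0
--     while True:
--         idx = lower_text.find(lower_query, pos)
--         if idx == -1:
--             break
--         starts.append(idx)
--         pos = idx + len(query)
--     # Pass 2: render fragments from the collected match starts.
--     fragments = []
--     last = 0
--     for start in starts:
--         if start > last: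
--             fragments.append((style_plain, text[last:start]))
--         fragments.append((style_match, text[start : start + len(query)]))
--         last = start + len(query)
--     if last < len(text):
--         fragments.append((style_plain, text[last:]))
--     return fragments
-- ===== Notes on version B (the rewrite author's own statement) =====
-- stated objective: alternative
-- what changed: A's single fused while-loop that finds and emits fragments in one scan is replaced by two passes: first collect all non-overlapping case-insensitive match start indices, then render plain/match fragments from that index list with a cursor.
import Mathlib
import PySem

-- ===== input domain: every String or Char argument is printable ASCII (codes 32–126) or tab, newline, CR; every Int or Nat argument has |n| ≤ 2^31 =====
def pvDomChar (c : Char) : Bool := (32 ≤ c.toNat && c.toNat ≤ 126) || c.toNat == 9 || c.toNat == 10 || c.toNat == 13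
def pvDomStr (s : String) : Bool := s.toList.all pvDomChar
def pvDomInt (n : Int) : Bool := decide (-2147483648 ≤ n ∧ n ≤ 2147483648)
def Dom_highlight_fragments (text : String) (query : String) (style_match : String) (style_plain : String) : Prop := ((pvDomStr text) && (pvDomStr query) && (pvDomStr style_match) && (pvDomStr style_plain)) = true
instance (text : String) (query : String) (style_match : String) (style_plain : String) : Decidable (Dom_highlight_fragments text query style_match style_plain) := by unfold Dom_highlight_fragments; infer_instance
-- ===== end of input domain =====

-- B re-implements the one fused scan as two passes (collect match starts, then render
-- fragments from them); same result, same cost — objective: alternative decomposition.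

-- ===== PORT A =====
-- A's while-loop: pos scans the text, emitting plain/match fragments as it goes.
-- (fuel is a totality device only; the wrappers pass enough fuel for every input)
def pvLoopA (cs lcs lq : List Char) (m : Nat) (sm sp : String) :
    Nat → Nat → List (String × String)
  | 0, _ => []
  | fuel + 1, pos =>
    if pos < cs.length then
      if PySem.Chars.findFrom lcs lq (pos : Int) none = -1 then
        [(sp, String.ofList (PySem.List.slice cs (some (pos : Int)) none))]
      else
        (if (pos : Int) < PySem.Chars.findFrom lcs lq (pos : Int) none then
          [(sp, String.ofList (PySem.List.slice cs (some (pos : Int))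
              (some (PySem.Chars.findFrom lcs lq (pos : Int) none))))]
         else [])
        ++ (sm, String.ofList (PySem.List.slice cs
              (some (PySem.Chars.findFrom lcs lq (pos : Int) none))
              (some (PySem.Chars.findFrom lcs lq (pos : Int) none + (m : Int)))))
           :: pvLoopA cs lcs lq m sm sp fuel
                ((PySem.Chars.findFrom lcs lq (pos : Int) none).toNat + m)
    else []

def highlight_fragments (text : String) (query : String) (style_match : String) (style_plain : String) : List (String × String) :=
  if query = "" then [(style_plain, text)]
  else
    pvLoopA text.toList (PySem.Chars.lower text.toList) (PySem.Chars.lower query.toList)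
      query.toList.length style_match style_plain (text.toList.length + 1) 0

-- ===== PORT B =====
-- B pass 1: collect the start index of every non-overlapping case-insensitive match.
def pvStarts (lcs lq : List Char) (m : Nat) : Nat → Nat → List Nat
  | 0, _ => []
  | fuel + 1, pos =>
    if PySem.Chars.findFrom lcs lq (pos : Int) none = -1 then []
    else
      (PySem.Chars.findFrom lcs lq (pos : Int) none).toNat
        :: pvStarts lcs lq m fuel
             ((PySem.Chars.findFrom lcs lq (pos : Int) none).toNat + m)

-- B pass 2: render fragments from the match starts, cursor `last`.
def pvRender (cs : List Char) (m : Nat) (sm sp : String) (last : Nat) :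
    List Nat → List (String × String)
  | [] =>
      if last < cs.length then
        [(sp, String.ofList (PySem.List.slice cs (some (last : Int)) none))]
      else []
  | s :: ss =>
      (if last < s then
        [(sp, String.ofList (PySem.List.slice cs (some (last : Int)) (some (s : Int))))]
       else [])
      ++ (sm, String.ofList (PySem.List.slice cs (some (s : Int)) (some ((s : Int) + (m : Int)))))
         :: pvRender cs m sm sp (s + m) ss

def highlight_fragments_alt (text : String) (query : String) (style_match : String) (style_plain : String) : List (String × String) :=
  if query = "" then [(style_plain, text)]
  else
    pvRender text.toList query.toList.length style_match style_plain 0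
      (pvStarts (PySem.Chars.lower text.toList) (PySem.Chars.lower query.toList)
        query.toList.length (text.toList.length + 1) 0)

-- ===== PRECONDITION & SPEC =====
def Spec_highlight_fragments (text : String) (query : String) (style_match : String) (style_plain : String) (out : List (String × String)) : Prop := out = highlight_fragments_alt text query style_match style_plain
instance (text : String) (query : String) (style_match : String) (style_plain : String) (out : List (String × String)) : Decidable (Spec_highlight_fragments text query style_match style_plain out) := by unfold Spec_highlight_fragments; infer_instance

-- ===== CLAIM (what is proved, stated in full; the proofs are below) =====
def Claim_equal_highlight_fragments : Prop := ∀ (text : String) (query : String) (style_match : String) (style_plain : String), Dom_highlight_fragments text query style_match style_plain → Spec_highlight_fragments text query style_match style_plain (highlight_fragments text query style_match style_plain)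

-- ===== LEMMAS AND PROOFS =====

-- A's fused scan equals B's collect-then-render, by induction on the (shared) fuel.
lemma pv_main (cs lcs lq : List Char) (m : Nat) (sm sp : String)
    (hl : lcs.length = cs.length) (hq : lq.length = m) (hm : 0 < m) :
    ∀ fuel pos, pos ≤ lcs.length → cs.length - pos < fuel →
      pvLoopA cs lcs lq m sm sp fuel pos =
      pvRender cs m sm sp pos (pvStarts lcs lq m fuel pos) := by
  intro fuel
  induction fuel with
  | zero => intro pos _ hk; omega
  | succ fuel ih =>
      intro pos hp hk
      rw [pvLoopA, pvStarts]
      by_cases hidx : PySem.Chars.findFrom lcs lq (pos : Int) none = -1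
      · by_cases h : pos < cs.length
        · simp [h, hidx, pvRender]
        · simp [h, hidx, pvRender]
      · obtain ⟨h1, h2, -⟩ := PySem.Chars.findFrom_natCast_spec lcs lq pos hp hidx
        have hlen := h2.length_le
        rw [List.length_drop] at hlen
        have hr0 : (0:Int) ≤ PySem.Chars.findFrom lcs lq (pos : Int) none :=
          le_trans (Int.natCast_nonneg pos) h1
        have hposn : pos < cs.length := by omega
        simp only [if_pos hposn, if_neg hidx, pvRender]
        congr 1
        · by_cases hlt : pos < (PySem.Chars.findFrom lcs lq (pos : Int) none).toNat
          · rw [if_pos (by omega), if_pos hlt, Int.toNat_of_nonneg hr0]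
          · rw [if_neg (by omega), if_neg hlt]
        · congr 1
          · rw [Int.toNat_of_nonneg hr0]
          · exact ih _ (by omega) (by omega)

-- ===== VERDICT (by name: the statement is the Claim_ definition above) =====
theorem highlight_fragments_spec : Claim_equal_highlight_fragments := by
  intro text query sm sp _
  unfold Spec_highlight_fragments highlight_fragments highlight_fragments_alt
  by_cases hq : query = ""
  · simp [hq]
  · simp only [if_neg hq]
    exact pv_main text.toList (PySem.Chars.lower text.toList)
      (PySem.Chars.lower query.toList) query.toList.length sm sp
      (by simp [PySem.Chars.lower]) (by simp [PySem.Chars.lower])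
      (by rw [List.length_pos_iff]; exact fun hn => hq (String.toList_eq_nil_iff.mp hn))
      (text.toList.length + 1) 0 (Nat.zero_le _) (by omega)
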